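-- pv_equiv track=rewrite | github.com/ac3643/Sudoku | sudoku.py | order_domain
-- ===== SOURCE A (Python) =====
-- def order_domain(var, assignment, board):
--
--     """order domain"""
--
--     if (len(assignment) <= 1):
--
--         return assignment
--
--
--     cons_lev = {}
--     for i in assignment:
--         cons_lev[i] = 0
--
--     for v in board.values():
--         if v in assignment:
--             cons_lev[v] =+ 1
--
--
--     cons_lev = {k: v for k, v in sorted(cons_lev.items(), key=lambda item: item[1])}#, reverse = True)}
--
--     #get keys in sorted order
--     res = [k for k in cons_lev.keys()]
--
--     return res
-- ===== SOURCE B (Python) =====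
-- def order_domain(var, assignment, board):
--     """order domain"""
--     if len(assignment) <= 1:
--         return assignment
--     vals = set(board.values())
--     absent = []
--     present = []
--     seen = set()
--     for i in assignment:
--         if i not in seen:
--             seen.add(i)
--             if i in vals:
--                 present.append(i)
--             else:
--                 absent.append(i)
--     return absent + present
-- ===== Notes on version B (the rewrite author's own statement) =====
-- stated objective: faster
-- what changed: Replaces the count-dict build plus stable sort by count with a set of board values and one dedup pass over assignment splitting values into absent/present and concatenating, exploiting that the counts are only ever 0 or 1.
import Mathlib
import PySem

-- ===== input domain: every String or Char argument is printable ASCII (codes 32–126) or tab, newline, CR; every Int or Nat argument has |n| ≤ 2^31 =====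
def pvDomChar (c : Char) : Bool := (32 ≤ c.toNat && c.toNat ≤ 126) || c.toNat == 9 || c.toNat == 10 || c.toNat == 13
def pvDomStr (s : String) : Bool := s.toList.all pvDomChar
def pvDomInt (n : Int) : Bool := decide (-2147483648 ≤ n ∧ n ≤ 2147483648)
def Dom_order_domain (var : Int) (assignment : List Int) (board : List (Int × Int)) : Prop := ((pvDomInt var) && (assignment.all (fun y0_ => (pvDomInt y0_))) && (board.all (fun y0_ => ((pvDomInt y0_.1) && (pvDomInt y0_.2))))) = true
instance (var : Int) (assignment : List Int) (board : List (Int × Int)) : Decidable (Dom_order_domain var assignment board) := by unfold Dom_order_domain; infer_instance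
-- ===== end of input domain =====

-- B replaces A's count-dict + stable sort by count with a set of board values and one
-- dedup pass over assignment splitting values into absent/present; objective: faster.


-- ===== PORT A =====
def order_domain (var : Int) (assignment : List Int) (board : List (Int × Int)) : List Int :=
  if assignment.length ≤ 1 then assignment
  else
    -- cons_lev = {}; for i in assignment: cons_lev[i] = 0
    let consLev : PySem.Dict Int Int :=
      assignment.foldl (fun d i => d.insert i 0) PySem.Dict.empty
    -- for v in board.values(): if v in assignment: cons_lev[v] =+ 1   (i.e. cons_lev[v] = 1)
    let consLev2 : PySem.Dict Int Int :=
      (PySem.Dict.ofList board).values.foldl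
        (fun d v => if v ∈ assignment then d.insert v 1 else d) consLev
    -- cons_lev = {k: v for k, v in sorted(cons_lev.items(), key=lambda item: item[1])}
    let consLev3 : PySem.Dict Int Int :=
      PySem.Dict.ofList (PySem.List.sorted consLev2.items (fun p => p.2) false)
    -- res = [k for k in cons_lev.keys()]
    consLev3.keys

-- ===== PORT B =====
def order_domain_alt (var : Int) (assignment : List Int) (board : List (Int × Int)) : List Int :=
  if assignment.length ≤ 1 then assignment
  else
    let vals := PySem.Set.ofList (PySem.Dict.ofList board).values
    -- absent, present, seen accumulated in one pass over assignment
    let st := assignment.foldl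
      (fun (st : List Int × List Int × PySem.Set Int) i =>
        if i ∈ st.2.2 then st
        else
          if i ∈ vals then (st.1, st.2.1 ++ [i], PySem.Set.add st.2.2 i)
          else (st.1 ++ [i], st.2.1, PySem.Set.add st.2.2 i))
      ([], [], [])
    st.1 ++ st.2.1

-- ===== PRECONDITION & SPEC =====
def Spec_order_domain (var : Int) (assignment : List Int) (board : List (Int × Int)) (out : List Int) : Prop := out = order_domain_alt var assignment board
instance (var : Int) (assignment : List Int) (board : List (Int × Int)) (out : List Int) : Decidable (Spec_order_domain var assignment board out) := by unfold Spec_order_domain; infer_instance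

-- ===== CLAIM (what is proved, stated in full; the proofs are below) =====
def Claim_equal_order_domain : Prop := ∀ (var : Int) (assignment : List Int) (board : List (Int × Int)), Dom_order_domain var assignment board → Spec_order_domain var assignment board (order_domain var assignment board)

-- ===== LEMMAS AND PROOFS =====

-- The zero-initialisation loop leaves every lookup (default 0) at 0.
theorem pv_getD_init (l : List Int) (d : PySem.Dict Int Int) (k : Int) :
    ((l.foldl (fun d i => d.insert i 0) d).getD k 0) = if k ∈ l then 0 else d.getD k 0 := by
  induction l using List.reverseRecOn with
  | nil => simp
  | append_singleton l x ih =>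
      simp only [List.foldl_append, List.foldl_cons, List.foldl_nil, PySem.Dict.getD_insert]
      by_cases hk : k = x <;> simp [hk, ih]

-- The counting loop sets exactly the assignment members occurring among the values to 1.
theorem pv_getD_count (assignment : List Int) (l : List Int) (d : PySem.Dict Int Int) (k : Int) :
    ((l.foldl (fun d v => if v ∈ assignment then d.insert v 1 else d) d).getD k 0)
      = if k ∈ l ∧ k ∈ assignment then 1 else d.getD k 0 := by
  induction l using List.reverseRecOn with
  | nil => simp
  | append_singleton l x ih =>
      simp only [List.foldl_append, List.foldl_cons, List.foldl_nil]
      by_cases hx : x ∈ assignment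
      · simp only [hx, if_true, PySem.Dict.getD_insert]
        by_cases hk : k = x
        · subst hk; simp [hx]
        · simp only [hk, if_false, ih, List.mem_append, List.mem_singleton]
          by_cases h1 : k ∈ l <;> simp [h1]
      · simp only [hx, if_false, ih, List.mem_append, List.mem_singleton]
        by_cases hk : k = x
        · subst hk; simp [hx]
        · simp [hk]
  -- values default to 0, so untouched keys read as d

-- The counting loop never adds a key (it only overwrites assignment keys).
theorem pv_keys_count (assignment : List Int) (l : List Int) (d : PySem.Dict Int Int)
    (hd : d.keys = PySem.Set.ofList assignment) :
    (l.foldl (fun d v => if v ∈ assignment then d.insert v 1 else d) d).keys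
      = PySem.Set.ofList assignment := by
  induction l generalizing d with
  | nil => simpa using hd
  | cons v l ih =>
      simp only [List.foldl_cons]
      apply ih
      by_cases hv : v ∈ assignment
      · simp only [hv, if_true]
        rw [PySem.Dict.keys_insert_of_contains _ _ (by
          rw [PySem.Dict.contains_iff_mem_keys, hd, PySem.Set.mem_ofList]; exact hv)]
        exact hd
      · simpa [hv] using hd

-- insertBy's structural unfolding on a cons.
theorem pv_insertBy_cons (before : (Int × Int) → (Int × Int) → Bool) (x y : Int × Int)
    (ys : List (Int × Int)) :
    PySem.List.insertBy before x (y :: ys)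
      = if before x y then x :: y :: ys else y :: PySem.List.insertBy before x ys := rfl

-- insertBy passes over a prefix it does not go before.
theorem pv_insertBy_skip (before : (Int × Int) → (Int × Int) → Bool) (x : Int × Int)
    (ys zs : List (Int × Int)) (h : ∀ y ∈ ys, before x y = false) :
    PySem.List.insertBy before x (ys ++ zs) = ys ++ PySem.List.insertBy before x zs := by
  induction ys with
  | nil => simp
  | cons y ys ih =>
      rw [List.cons_append, pv_insertBy_cons, h y (by simp), if_neg (by simp)]
      exact congrArg (y :: ·) (ih (fun y hy => h y (by simp [hy])))

-- A stable sort of 0/1-valued pairs by value is: the 0s in order, then the 1s in order.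
theorem pv_sorted01 (l : List (Int × Int)) (h : ∀ p ∈ l, p.2 = 0 ∨ p.2 = 1) :
    PySem.List.sorted l (fun p => p.2) false
      = l.filter (fun p => p.2 == 0) ++ l.filter (fun p => !(p.2 == 0)) := by
  induction l using List.reverseRecOn with
  | nil => simp [PySem.List.sorted_eq_foldl_insertBy]
  | append_singleton l x ih =>
      have hl : ∀ p ∈ l, p.2 = 0 ∨ p.2 = 1 := fun p hp => h p (by simp [hp])
      have hx : x.2 = 0 ∨ x.2 = 1 := h x (by simp)
      rw [PySem.List.sorted_eq_foldl_insertBy, List.foldl_append, List.foldl_cons, List.foldl_nil,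
        ← PySem.List.sorted_eq_foldl_insertBy, ih hl]
      rcases hx with hx | hx
      · -- x goes right after the zeros
        rw [pv_insertBy_skip _ _ _ _ (by
          intro y hy
          have : y.2 = 0 := by simpa using (List.of_mem_filter hy)
          simp [hx, this])]
        have hins : PySem.List.insertBy (fun a b => decide (a.2 < b.2)) x
            (l.filter (fun p => !(p.2 == 0))) = x :: l.filter (fun p => !(p.2 == 0)) := by
          cases hf : l.filter (fun p => !(p.2 == 0)) with
          | nil => simp [PySem.List.insertBy]
          | cons p t =>
              have hp : p ∈ l.filter (fun p => !(p.2 == 0)) := by rw [hf]; simp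
              have hp2 : p.2 = 1 := by
                have h1 : ¬ p.2 = 0 := by simpa using List.of_mem_filter hp
                rcases hl p (List.mem_of_mem_filter hp) with h0 | h0
                · exact absurd h0 h1
                · exact h0
              simp [PySem.List.insertBy, hx, hp2]
        rw [hins]
        simp [List.filter_append, hx]
      · -- x goes to the very end
        rw [PySem.List.insertBy_of_forall_not_before _ _ _ (by
          intro y hy
          rcases List.mem_append.mp hy with hy | hy
          · have : y.2 = 0 := by simpa using (List.of_mem_filter hy)
            simp [hx, this]
          · have h1 : ¬ y.2 = 0 := by simpa using List.of_mem_filter hy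
            rcases hl y (List.mem_of_mem_filter hy) with h0 | h0
            · exact absurd h0 h1
            · simp [hx, h0])]
        simp [List.filter_append, hx]

-- B's loop state after any list: (fresh values not among vals, fresh values among vals, seen).
theorem pv_bfold (vals : List Int) (l : List Int) :
    (l.foldl
      (fun (st : List Int × List Int × PySem.Set Int) i =>
        if i ∈ st.2.2 then st
        else
          if i ∈ vals then (st.1, st.2.1 ++ [i], PySem.Set.add st.2.2 i)
          else (st.1 ++ [i], st.2.1, PySem.Set.add st.2.2 i))
      ([], [], []))
    = ((PySem.Set.ofList l).filter (fun k => !decide (k ∈ vals)),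
       (PySem.Set.ofList l).filter (fun k => decide (k ∈ vals)),
       PySem.Set.ofList l) := by
  induction l using List.reverseRecOn with
  | nil => simp [PySem.Set.ofList]
  | append_singleton l x ih =>
      rw [List.foldl_append, List.foldl_cons, List.foldl_nil, ih]
      by_cases hx : x ∈ l
      · have hmem : x ∈ PySem.Set.ofList l := (PySem.Set.mem_ofList l x).mpr hx
        rw [PySem.Set.ofList_append_singleton, PySem.Set.add_of_mem hmem]
        simp [hmem]
      · have hmem : x ∉ PySem.Set.ofList l := fun h => hx ((PySem.Set.mem_ofList l x).mp h)
        rw [PySem.Set.ofList_append_singleton, PySem.Set.add_of_not_mem hmem]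
        by_cases hv : x ∈ vals <;>
          simp [hmem, hv, List.filter_append]

-- ===== VERDICT (by name: the statement is the Claim_ definition above) =====
theorem order_domain_spec : Claim_equal_order_domain := by
  intro var assignment board _
  unfold Spec_order_domain order_domain order_domain_alt
  by_cases hlen : assignment.length ≤ 1
  · simp [hlen]
  · simp only [hlen, if_false]
    set vals := (PySem.Dict.ofList board).values with hvals
    -- A's dict after both loops
    set d1 : PySem.Dict Int Int :=
      assignment.foldl (fun d i => d.insert i 0) PySem.Dict.empty with hd1
    set d2 : PySem.Dict Int Int :=
      vals.foldl (fun d v => if v ∈ assignment then d.insert v 1 else d) d1 with hd2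
    have hkeys1 : d1.keys = (PySem.Set.ofList assignment) := by
      rw [hd1, PySem.Dict.keys_foldl_insert, PySem.Dict.keys_empty, PySem.Set.update_nil_left]
    have hkeys2 : d2.keys = (PySem.Set.ofList assignment) := by
      rw [hd2]; exact pv_keys_count assignment vals d1 hkeys1
    have hnd : d2.keys.Nodup := by rw [hkeys2]; exact PySem.Set.nodup_ofList assignment
    have hgetD : ∀ k ∈ PySem.Set.ofList assignment, d2.getD k 0 = if k ∈ vals then 1 else 0 := by
      intro k hk
      have hka : k ∈ assignment := (PySem.Set.mem_ofList assignment k).mp hk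
      rw [hd2, pv_getD_count, hd1, pv_getD_init]
      by_cases hkv : k ∈ vals <;> simp [hkv, hka]
    have hitems : d2.items = (PySem.Set.ofList assignment).map (fun k => (k, if k ∈ vals then (1:Int) else 0)) := by
      rw [PySem.Dict.items_eq_map_keys d2 hnd 0, hkeys2]
      exact List.map_congr_left (fun k hk => by rw [hgetD k hk])
    -- the sorted items
    have hsorted : PySem.List.sorted d2.items (fun p => p.2) false
        = ((PySem.Set.ofList assignment).filter (fun k => !decide (k ∈ vals))).map (fun k => (k, if k ∈ vals then (1:Int) else 0))
          ++ ((PySem.Set.ofList assignment).filter (fun k => decide (k ∈ vals))).map (fun k => (k, if k ∈ vals then (1:Int) else 0)) := by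
      rw [pv_sorted01 _ (by
        rw [hitems]; intro p hp
        rcases List.mem_map.mp hp with ⟨k, _, rfl⟩
        by_cases hkv : k ∈ vals <;> simp [hkv])]
      rw [hitems, List.filter_map, List.filter_map]
      congr 1
      · exact congrArg _ (List.filter_congr (fun k _ => by
          by_cases hkv : k ∈ vals <;> simp [hkv]))
      · exact congrArg _ (List.filter_congr (fun k _ => by
          by_cases hkv : k ∈ vals <;> simp [hkv]))
    -- keys of the rebuilt dict = first components of the sorted items
    have hndfst : ((PySem.List.sorted d2.items (fun p => p.2) false).map Prod.fst).Nodup := by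
      have hperm : ((PySem.List.sorted d2.items (fun p => p.2) false).map Prod.fst).Perm
          (d2.items.map Prod.fst) := (PySem.List.sorted_perm d2.items (fun p => p.2) false).map _
      refine hperm.nodup_iff.mpr ?_
      have : d2.items.map Prod.fst = d2.keys := rfl
      rw [this, hkeys2]; exact PySem.Set.nodup_ofList assignment
    have hkeys3 : (PySem.Dict.ofList (PySem.List.sorted d2.items (fun p => p.2) false)).keys
        = (PySem.List.sorted d2.items (fun p => p.2) false).map Prod.fst := by
      unfold PySem.Dict.ofList PySem.Dict.update
      rw [PySem.Dict.keys_foldl_insert_key (PySem.List.sorted d2.items (fun p => p.2) false)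
            (fun p : Int × Int => p.1) (fun (_ : PySem.Dict Int Int) (p : Int × Int) => p.2)
            PySem.Dict.empty,
        PySem.Dict.keys_empty, PySem.Set.update_nil_left]
      rw [show (PySem.List.sorted d2.items (fun p => p.2) false).map (fun p : Int × Int => p.1)
            = (PySem.List.sorted d2.items (fun p => p.2) false).map Prod.fst from rfl]
      exact PySem.Set.ofList_eq_self_of_nodup _ hndfst
    rw [hkeys3, hsorted, pv_bfold]
    simp only [List.map_append, List.map_map, Function.comp_def]
    simp
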